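-- pv_equiv track=rewrite | github.com/roseane30pontes/PythonExerciciosBack | 1ºDesafioPessoal.py | ultima_parada
-- ===== SOURCE A (Python) =====
-- def ultima_parada(combustivel, consumo, postos_de_gasolina):
--     autonomia = combustivel * consumo
--     postos2 = sorted(postos_de_gasolina)
--
--
--     if (len(postos_de_gasolina) == 0):
--         return -1
--     else:
--         postoMaisDistante = 0
--
--     for i in postos2:
--         if (autonomia > i):
--             postoMaisDistante = i
--     else:
--         return postoMaisDistante
-- ===== SOURCE B (Python) =====
-- def ultima_parada(combustivel, consumo, postos_de_gasolina):
--     if not postos_de_gasolina: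
--         return -1
--     autonomia = combustivel * consumo
--     best = None
--     for p in postos_de_gasolina:
--         if p < autonomia and (best is None or p > best):
--             best = p
--     return 0 if best is None else best
-- ===== Notes on version B (the rewrite author's own statement) =====
-- stated objective: faster
-- what changed: Replaced sort-then-scan-for-last-below-threshold with a single linear pass tracking the maximum station value strictly below the autonomy.
import Mathlib
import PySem

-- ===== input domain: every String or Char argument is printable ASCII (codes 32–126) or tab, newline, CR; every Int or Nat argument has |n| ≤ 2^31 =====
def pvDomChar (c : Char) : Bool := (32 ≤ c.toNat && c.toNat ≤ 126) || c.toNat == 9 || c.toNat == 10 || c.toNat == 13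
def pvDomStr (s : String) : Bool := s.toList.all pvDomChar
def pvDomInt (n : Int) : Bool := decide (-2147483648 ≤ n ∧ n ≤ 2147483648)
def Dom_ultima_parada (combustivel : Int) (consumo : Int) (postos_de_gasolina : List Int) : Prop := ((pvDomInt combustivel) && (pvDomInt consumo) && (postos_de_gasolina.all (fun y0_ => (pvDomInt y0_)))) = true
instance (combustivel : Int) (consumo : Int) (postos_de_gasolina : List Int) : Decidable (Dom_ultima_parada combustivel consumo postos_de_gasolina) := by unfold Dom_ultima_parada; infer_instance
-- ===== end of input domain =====

-- B replaces A's sort-then-scan (last sorted element below the autonomy) by one linear pass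
-- tracking the maximum station value strictly below the autonomy (objective: faster).

-- ===== PORT A =====
def ultima_parada (combustivel : Int) (consumo : Int) (postos_de_gasolina : List Int) : Int :=
  let autonomia := combustivel * consumo
  let postos2 := PySem.List.sorted postos_de_gasolina (fun x => x) false
  if postos_de_gasolina.length = 0 then -1
  else
    -- postoMaisDistante = 0; for i in postos2: if autonomia > i: postoMaisDistante = i
    postos2.foldl (fun postoMaisDistante i => if autonomia > i then i else postoMaisDistante) 0

-- ===== PORT B =====
-- loop body of B: if p < autonomia and (best is None or p > best): best = p
def pvStepB (autonomia : Int) (best : Option Int) (p : Int) : Option Int :=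
  if decide (p < autonomia) && best.elim true (fun b => decide (b < p)) then some p else best

def ultima_parada_alt (combustivel : Int) (consumo : Int) (postos_de_gasolina : List Int) : Int :=
  if postos_de_gasolina = [] then -1
  else
    let autonomia := combustivel * consumo
    -- best = None; for p: if p < autonomia and (best is None or p > best): best = p
    match postos_de_gasolina.foldl (pvStepB autonomia) none with
    | none => 0
    | some b => b

-- ===== PRECONDITION & SPEC =====
def Spec_ultima_parada (combustivel : Int) (consumo : Int) (postos_de_gasolina : List Int) (out : Int) : Prop := out = ultima_parada_alt combustivel consumo postos_de_gasolina
instance (combustivel : Int) (consumo : Int) (postos_de_gasolina : List Int) (out : Int) : Decidable (Spec_ultima_parada combustivel consumo postos_de_gasolina out) := by unfold Spec_ultima_parada; infer_instance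

-- ===== CLAIM (what is proved, stated in full; the proofs are below) =====
def Claim_equal_ultima_parada : Prop := ∀ (combustivel : Int) (consumo : Int) (postos_de_gasolina : List Int), Dom_ultima_parada combustivel consumo postos_de_gasolina → Spec_ultima_parada combustivel consumo postos_de_gasolina (ultima_parada combustivel consumo postos_de_gasolina)

-- ===== LEMMAS AND PROOFS =====

-- max? is invariant under permutation (on Int).
theorem pv_max?_perm {l₁ l₂ : List Int} (h : l₁.Perm l₂) : l₁.max? = l₂.max? := by
  cases h1 : l₁.max? with
  | none =>
      rw [List.max?_eq_none_iff] at h1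
      subst h1
      rw [eq_comm, List.max?_eq_none_iff]
      exact h.nil_eq.symm
  | some m =>
      rw [List.max?_eq_some_iff] at h1
      rw [eq_comm, List.max?_eq_some_iff]
      exact ⟨h.mem_iff.mp h1.1, fun b hb => h1.2 b (h.mem_iff.mpr hb)⟩

theorem pv_max?_cons (a : Int) (t : List Int) : (a :: t).max? = some (t.foldl max a) := rfl

-- B's fold from `some b` computes a running max over the elements below `aut`.
theorem pv_foldB_some (aut : Int) (l : List Int) (b : Int) :
    l.foldl (pvStepB aut) (some b)
    = some ((l.filter (fun i => decide (i < aut))).foldl max b) := by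
  induction l generalizing b with
  | nil => rfl
  | cons p l ih =>
      simp only [List.foldl_cons, List.filter_cons]
      by_cases hp : p < aut
      · by_cases hbp : b < p
        · have h1 : pvStepB aut (some b) p = some p := by simp [pvStepB, hp, hbp]
          rw [h1, ih]
          simp [hp, max_eq_right (le_of_lt hbp)]
        · have h1 : pvStepB aut (some b) p = some b := by simp [pvStepB, hp, hbp]
          rw [h1, ih]
          simp [hp, max_eq_left (le_of_not_gt hbp)]
      · have h1 : pvStepB aut (some b) p = some b := by simp [pvStepB, hp]
        rw [h1, ih]
        simp [hp]

-- B's fold from `none` computes max? of the filtered list.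
theorem pv_foldB_none (aut : Int) (l : List Int) :
    l.foldl (pvStepB aut) none
    = (l.filter (fun i => decide (i < aut))).max? := by
  induction l with
  | nil => rfl
  | cons p l ih =>
      simp only [List.foldl_cons, List.filter_cons]
      by_cases hp : p < aut
      · have h1 : pvStepB aut none p = some p := by simp [pvStepB, hp]
        rw [h1, pv_foldB_some]
        simp only [hp, decide_true, if_true, pv_max?_cons]
      · have h1 : pvStepB aut none p = none := by simp [pvStepB, hp]
        rw [h1, ih]
        simp [hp]

theorem pv_maxfold_of_le (i : Int) (fl : List Int) (h : ∀ x ∈ fl, i ≤ x) :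
    fl.foldl max i = (fl.max?).getD i := by
  cases fl with
  | nil => rfl
  | cons a t =>
      have hia : max i a = a := max_eq_right (h a (List.mem_cons_self))
      simp only [List.foldl_cons, pv_max?_cons, Option.getD_some, hia]

-- A's fold over a ≤-sorted list returns the last (= greatest) element below `aut`, else the accumulator.
theorem pv_foldA_sorted (aut : Int) (l : List Int) (acc : Int)
    (h : l.Pairwise (· ≤ ·)) :
    l.foldl (fun a i => if aut > i then i else a) acc
    = ((l.filter (fun i => decide (i < aut))).max?).getD acc := by
  induction l generalizing acc with
  | nil => rfl
  | cons i l ih =>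
      rcases List.pairwise_cons.mp h with ⟨h1, h2⟩
      simp only [List.foldl_cons, List.filter_cons]
      by_cases hi : i < aut
      · have := ih i h2
        simp only [gt_iff_lt, hi, if_pos, decide_true, pv_max?_cons]
        rw [this]
        rw [pv_maxfold_of_le i _ (fun x hx => h1 x (List.mem_of_mem_filter hx))]
        cases hm : (l.filter (fun i => decide (i < aut))).max? <;> simp
      · have hfl : l.filter (fun i => decide (i < aut)) = [] := by
          rw [List.filter_eq_nil_iff]
          intro x hx
          simp only [decide_eq_true_eq]
          exact fun hlt => hi (lt_of_le_of_lt (h1 x hx) hlt)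
        simp [hi, ih acc h2, hfl]

-- ===== VERDICT (by name: the statement is the Claim_ definition above) =====
theorem ultima_parada_spec : Claim_equal_ultima_parada := by
  intro c k xs _
  show ultima_parada c k xs = ultima_parada_alt c k xs
  unfold ultima_parada ultima_parada_alt
  by_cases hnil : xs = []
  · subst hnil; rfl
  · simp only [List.length_eq_zero_iff, hnil, if_false]
    set aut := c * k
    rw [pv_foldA_sorted aut _ 0 (PySem.List.sorted_pairwise xs (fun x => x))]
    rw [pv_foldB_none aut xs]
    have hperm : (PySem.List.sorted xs (fun x => x) false).Perm xs :=
      PySem.List.sorted_perm xs (fun x => x) false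
    rw [pv_max?_perm (hperm.filter _)]
    cases hm : (xs.filter (fun i => decide (i < aut))).max? <;> simp
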